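-- pv_equiv track=rewrite | github.com/joshanashakya/dissertation | workspace/dataset/java-python/GeeksForGeeks/2719/A/2.py | maxSumArrangement
-- ===== SOURCE A (Python) =====
-- def maxSumArrangement( A,  R,  N,  M):
--
--     # Auxilary array to find the
--     # count of each selected elements
--     # Initialize with 0
--     count = [0 for i in range(N)]
--
--     # Finding count of every element
--     # to be selected
--     for i in range(M):
--
--         l = R[i][0]
--         r = R[i][1] + 1
--
--         # Making it to 0-indexing
--         l = l - 1
--         r = r - 1
--
--         # Prefix sum array concept is used
--         # to obtain the count array
--         count[l] = count[l] + 1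
--
--         if (r < N):
--             count[r] = count[r] - 1
--
--     # Iterating over the count array
--     # to get the final array
--     for i in range(1, N):
--         count[i] = count[i] + count[i - 1]
--
--     # Variable to store the maximum sum
--     ans = 0
--
--     # Sorting both the arrays
--     count.sort()
--     A.sort()
--
--     # Loop to find the maximum sum
--     for i in range(N - 1, -1, -1):
--         ans = ans + A[i] * count[i]
--
--     return ans
-- ===== SOURCE B (Python) =====
-- def maxSumArrangement(A, R, N, M):
--     # Note: unlike the original, this does not sort A in place (return value is identical).
--     count = [0] * N
--     for i in range(M):
--         l = R[i][0]
--         r = R[i][1]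
--         for j in range(l - 1, min(r, N)):
--             count[j] += 1
--     return sum(a * c for a, c in zip(sorted(A), sorted(count)))
-- ===== Notes on version B (the rewrite author's own statement) =====
-- stated objective: simpler
-- what changed: Replaces the difference-array + in-place prefix-sum construction of the coverage counts by a direct per-query increment loop over range(l-1, min(r, N)), and replaces the sort-then-reverse-index accumulation by sum over zip(sorted(A), sorted(count)).
-- outside the precondition, e.g. on maxSumArrangement([1, 2], [[0, 2]], 2, 1): A returns 2, B returns 5; on maxSumArrangement([1, 2], [[2, 0]], 2, 1): A returns -1, B returns 0
import Mathlib
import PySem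

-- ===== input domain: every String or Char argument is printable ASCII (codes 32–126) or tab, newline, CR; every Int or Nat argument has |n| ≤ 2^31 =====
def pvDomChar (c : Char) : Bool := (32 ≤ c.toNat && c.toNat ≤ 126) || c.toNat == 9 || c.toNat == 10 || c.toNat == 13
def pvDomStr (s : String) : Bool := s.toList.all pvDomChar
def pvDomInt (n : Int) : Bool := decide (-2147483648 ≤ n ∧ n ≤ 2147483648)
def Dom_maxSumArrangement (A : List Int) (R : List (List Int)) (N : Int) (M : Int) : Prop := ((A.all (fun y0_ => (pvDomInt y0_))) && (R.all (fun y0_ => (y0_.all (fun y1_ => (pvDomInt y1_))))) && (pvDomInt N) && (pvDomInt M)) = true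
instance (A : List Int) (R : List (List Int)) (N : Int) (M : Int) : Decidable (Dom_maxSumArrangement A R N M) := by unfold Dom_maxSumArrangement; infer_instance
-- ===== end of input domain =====

-- B replaces A's difference-array + prefix-sum count construction by direct per-query increments
-- and replaces the reverse-index accumulation by a sum over zip of the two sorted lists
-- (objective: simpler). A sorts its list arguments in place; B does not mutate them — the
-- equivalence proved here is about the return value.

-- ===== PORT A =====
def maxSumArrangement (A : List Int) (R : List (List Int)) (N : Int) (M : Int) : Int :=
  let count : List Int := (PySem.List.pyRange 0 N 1).map (fun _ => 0)
  let count := (PySem.List.pyRange 0 M 1).foldl (fun count i =>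
    let l := PySem.List.pyGetD (PySem.List.pyGetD R i []) 0 0
    let r := PySem.List.pyGetD (PySem.List.pyGetD R i []) 1 0 + 1
    let l := l - 1
    let r := r - 1
    let count := PySem.List.pySetD count l (PySem.List.pyGetD count l 0 + 1)
    if r < N then PySem.List.pySetD count r (PySem.List.pyGetD count r 0 - 1) else count) count
  let count := (PySem.List.pyRange 1 N 1).foldl (fun count i =>
    PySem.List.pySetD count i (PySem.List.pyGetD count i 0 + PySem.List.pyGetD count (i - 1) 0)) count
  let ans : Int := 0
  let count := PySem.List.sorted count (fun x => x) false
  let A := PySem.List.sorted A (fun x => x) false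
  (PySem.List.pyRange (N - 1) (-1) (-1)).foldl (fun ans i =>
    ans + PySem.List.pyGetD A i 0 * PySem.List.pyGetD count i 0) ans

-- ===== PORT B =====
def maxSumArrangement_alt (A : List Int) (R : List (List Int)) (N : Int) (M : Int) : Int :=
  let count := (PySem.List.pyRange 0 M 1).foldl (fun count i =>
    let l := PySem.List.pyGetD (PySem.List.pyGetD R i []) 0 0
    let r := PySem.List.pyGetD (PySem.List.pyGetD R i []) 1 0
    (PySem.List.pyRange (l - 1) (min r N) 1).foldl (fun count j =>
      PySem.List.pySetD count j (PySem.List.pyGetD count j 0 + 1)) count)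
    (PySem.List.pyRepeat [0] N)
  (((PySem.List.sorted A (fun x => x) false).zip (PySem.List.sorted count (fun x => x) false)).map
    (fun p => p.1 * p.2)).sum

-- ===== PRECONDITION & SPEC =====
-- Pre_ excludes the inputs on which A raises (N > len(A); 0 < M with M > len(R); a used query row
-- shorter than 2; a used row with R[i][0] > N or with an index below -N) and the corner rows with
-- R[i][0] < 1 or R[i][1] < R[i][0] - 1 on which A still returns but the value hinges on Python's
-- negative-index wraparound resp. the difference array's accidental negative counts — there A's
-- and B's values are both implementation accidents.
def Pre_maxSumArrangement (A : List Int) (R : List (List Int)) (N : Int) (M : Int) : Prop :=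
  N ≤ (A.length : Int) ∧ (0 < M → M ≤ (R.length : Int)) ∧
  ∀ q ∈ R.take M.toNat,
    2 ≤ q.length ∧ 1 ≤ q.getD 0 0 ∧ q.getD 0 0 ≤ N ∧ q.getD 0 0 ≤ q.getD 1 0 + 1
instance (A : List Int) (R : List (List Int)) (N : Int) (M : Int) : Decidable (Pre_maxSumArrangement A R N M) := by unfold Pre_maxSumArrangement; infer_instance

def pvWitness_maxSumArrangement : List Int × List (List Int) × Int × Int :=
  ([3, 1, 2], [[1, 2], [2, 3]], 3, 2)

def Spec_maxSumArrangement (A : List Int) (R : List (List Int)) (N : Int) (M : Int) (out : Int) : Prop := out = maxSumArrangement_alt A R N M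
instance (A : List Int) (R : List (List Int)) (N : Int) (M : Int) (out : Int) : Decidable (Spec_maxSumArrangement A R N M out) := by unfold Spec_maxSumArrangement; infer_instance

-- ===== CLAIM (what is proved, stated in full; the proofs are below) =====
def Claim_equal_maxSumArrangement : Prop := ∀ (A : List Int) (R : List (List Int)) (N : Int) (M : Int), Dom_maxSumArrangement A R N M → Pre_maxSumArrangement A R N M → Spec_maxSumArrangement A R N M (maxSumArrangement A R N M)

-- ===== LEMMAS AND PROOFS =====

-- Stage combinators (proof helpers; each port is definitionally the composition of its stages).
def pvAStep (N : Int) (count : List Int) (q : List Int) : List Int :=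
  let l := PySem.List.pyGetD q 0 0
  let r := PySem.List.pyGetD q 1 0 + 1
  let l := l - 1
  let r := r - 1
  let count := PySem.List.pySetD count l (PySem.List.pyGetD count l 0 + 1)
  if r < N then PySem.List.pySetD count r (PySem.List.pyGetD count r 0 - 1) else count

def pvBStep (N : Int) (count : List Int) (q : List Int) : List Int :=
  (PySem.List.pyRange (PySem.List.pyGetD q 0 0 - 1) (min (PySem.List.pyGetD q 1 0) N) 1).foldl
    (fun count j => PySem.List.pySetD count j (PySem.List.pyGetD count j 0 + 1)) count

def pvPS (N : Int) (c : List Int) : List Int :=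
  (PySem.List.pyRange 1 N 1).foldl (fun count i =>
    PySem.List.pySetD count i (PySem.List.pyGetD count i 0 + PySem.List.pyGetD count (i - 1) 0)) c

def pvFinA (As Cs : List Int) (N : Int) : Int :=
  (PySem.List.pyRange (N - 1) (-1) (-1)).foldl (fun ans i =>
    ans + PySem.List.pyGetD As i 0 * PySem.List.pyGetD Cs i 0) 0

lemma portA_eq (A : List Int) (R : List (List Int)) (N M : Int) :
    maxSumArrangement A R N M =
    pvFinA (PySem.List.sorted A (fun x => x) false)
      (PySem.List.sorted
        (pvPS N ((PySem.List.pyRange 0 M 1).foldl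
          (fun c i => pvAStep N c (PySem.List.pyGetD R i []))
          ((PySem.List.pyRange 0 N 1).map (fun _ => 0))))
        (fun x => x) false) N := rfl

lemma portB_eq (A : List Int) (R : List (List Int)) (N M : Int) :
    maxSumArrangement_alt A R N M =
    (((PySem.List.sorted A (fun x => x) false).zip
      (PySem.List.sorted
        ((PySem.List.pyRange 0 M 1).foldl
          (fun c i => pvBStep N c (PySem.List.pyGetD R i []))
          (PySem.List.pyRepeat [0] N))
        (fun x => x) false)).map (fun p => p.1 * p.2)).sum := rfl

-- a fold over range(M) reading xs[i] is a fold over the first M elements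
lemma foldl_pyRange_take {α β : Type} (xs : List α) (d : α) (f : β → α → β) (init : β) (M : Int)
    (h : 0 < M → M ≤ (xs.length : Int)) :
    (PySem.List.pyRange 0 M 1).foldl (fun acc i => f acc (PySem.List.pyGetD xs i d)) init
      = (xs.take M.toNat).foldl f init := by
  by_cases hM : 0 < M
  · have hMx : M ≤ (xs.length : Int) := h hM
    have hlen : ((xs.take M.toNat).length : Int) = M := by
      simp [List.length_take]; omega
    have h1 : (PySem.List.pyRange 0 M 1).foldl
        (fun acc i => f acc (PySem.List.pyGetD xs i d)) init
        = (PySem.List.pyRange 0 M 1).foldl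
        (fun acc i => f acc (PySem.List.pyGetD (xs.take M.toNat) i d)) init := by
      refine PySem.List.foldl_congr_mem _ _ _ _ (fun acc x hx => ?_)
      have hx' := PySem.List.mem_pyRange_one.mp hx
      have hxl : x < ((xs.take M.toNat).length : Int) := by omega
      rw [PySem.List.pyGetD_eq_getElem _ d hx'.1 (by omega),
        PySem.List.pyGetD_eq_getElem _ d hx'.1 hxl,
        List.getElem_take]
    have h2 := PySem.List.foldl_pyRange_zero_pyGetD (xs.take M.toNat) d f init
    rw [PySem.List.len_eq, hlen] at h2
    rw [h1]
    exact h2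
  · rw [PySem.List.pyRange_one_eq_nil (by omega), Int.toNat_of_nonpos (by omega)]
    simp

-- elementwise effect of B's inner increment loop
lemma addRange_spec (n : Nat) (a b : Int) (xs : List Int)
    (hn : (b - a).toNat = n) (ha : 0 ≤ a) (hb : b ≤ (xs.length : Int)) :
    ((PySem.List.pyRange a b 1).foldl
      (fun count j => PySem.List.pySetD count j (PySem.List.pyGetD count j 0 + 1)) xs).length
      = xs.length ∧
    ∀ (i : Nat) (hi : i < xs.length),
      ((PySem.List.pyRange a b 1).foldl
        (fun count j => PySem.List.pySetD count j (PySem.List.pyGetD count j 0 + 1)) xs).getD i 0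
        = xs[i]'hi + (if a ≤ (i : Int) ∧ (i : Int) < b then 1 else 0) := by
  induction n generalizing a xs with
  | zero =>
    have hba : b ≤ a := by omega
    rw [PySem.List.pyRange_one_eq_nil hba]
    refine ⟨rfl, fun i hi => ?_⟩
    rw [List.foldl_nil, List.getD_eq_getElem _ _ hi]
    have : ¬ (a ≤ (i : Int) ∧ (i : Int) < b) := by omega
    simp [this]
  | succ n ih =>
    have hab : a < b := by omega
    rw [PySem.List.pyRange_one_cons hab, List.foldl_cons]
    have haN : a < (xs.length : Int) := lt_of_lt_of_le hab hb
    have haN' : a.toNat < xs.length := by omega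
    have hset : PySem.List.pySetD xs a (PySem.List.pyGetD xs a 0 + 1)
        = xs.set a.toNat (xs[a.toNat]'haN' + 1) := by
      rw [PySem.List.pySetD_of_nonneg xs _ ha,
        PySem.List.pyGetD_eq_getElem xs 0 ha (by exact_mod_cast haN)]
    rw [hset]
    obtain ⟨hlen, hget⟩ := ih (a + 1) (xs.set a.toNat (xs[a.toNat]'haN' + 1))
      (by omega) (by omega) (by simpa using hb)
    refine ⟨by simpa using hlen, fun i hi => ?_⟩
    rw [hget i (by simpa using hi)]
    rw [List.getElem_set]
    by_cases h1 : a.toNat = i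
    · subst h1
      rw [if_pos rfl]
      split_ifs <;> omega
    · rw [if_neg h1]
      split_ifs <;> omega

-- sum of a prefix after a point update
lemma sum_take_set (xs : List Int) (j : Nat) (v : Int) (m : Nat) (hj : j < xs.length) :
    ((xs.set j v).take m).sum = (xs.take m).sum + (if j < m then v - xs[j]'hj else 0) := by
  induction xs generalizing j m with
  | nil => simp at hj
  | cons x xs ih =>
    cases j with
    | zero =>
      cases m with
      | zero => simp
      | succ m => simp [List.set_cons_zero]; ring
    | succ j =>
      cases m with
      | zero => simp
      | succ m =>
        simp only [List.set_cons_succ, List.take_succ_cons, List.sum_cons,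
          List.getElem_cons_succ]
        rw [ih j m (by simpa using hj)]
        split_ifs with h1 h2 h2 <;> omega

-- prefix sums, and A's in-place prefix loop computes them
def pvPref (a : Int) : List Int → List Int
  | [] => []
  | x :: xs => (a + x) :: pvPref (a + x) xs

lemma length_pvPref (a : Int) (xs : List Int) : (pvPref a xs).length = xs.length := by
  induction xs generalizing a with
  | nil => rfl
  | cons x xs ih => simp [pvPref, ih]

lemma getElem_pvPref (a : Int) (xs : List Int) (i : Nat) (hi : i < xs.length) :
    (pvPref a xs)[i]'(by rw [length_pvPref]; exact hi) = a + (xs.take (i + 1)).sum := by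
  induction xs generalizing a i with
  | nil => simp at hi
  | cons x xs ih =>
    cases i with
    | zero => simp [pvPref]
    | succ i =>
      simp only [pvPref, List.getElem_cons_succ, List.take_succ_cons, List.sum_cons]
      rw [ih (a + x) i (by simpa using hi)]
      ring

lemma getD_append_cons (pre suf : List Int) (v : Int) :
    (pre ++ v :: suf).getD pre.length 0 = v := by
  rw [List.getD_eq_getElem?_getD, List.getElem?_append_right le_rfl]
  simp

lemma set_append_cons (pre suf : List Int) (v w : Int) :
    (pre ++ v :: suf).set pre.length w = pre ++ w :: suf := by
  rw [List.set_append]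
  simp

lemma pvPS_go (suf pre : List Int) (x : Int) :
    (PySem.List.pyRange ((pre.length : Int) + 1) ((pre.length : Int) + 1 + suf.length) 1).foldl
      (fun count i =>
        PySem.List.pySetD count i (PySem.List.pyGetD count i 0 + PySem.List.pyGetD count (i - 1) 0))
      (pre ++ x :: suf)
      = pre ++ x :: pvPref x suf := by
  induction suf generalizing pre x with
  | nil =>
    rw [show (pre.length : Int) + 1 + (List.length ([] : List Int)) = (pre.length : Int) + 1 by simp,
      PySem.List.pyRange_one_eq_nil le_rfl]
    rfl
  | cons y suf ih =>
    rw [PySem.List.pyRange_one_cons (by simp only [List.length_cons]; push_cast; omega),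
      List.foldl_cons]
    have e1 : PySem.List.pyGetD (pre ++ x :: y :: suf) ((pre.length : Int) + 1) 0 = y := by
      rw [show ((pre.length : Int) + 1) = (((pre ++ [x]).length : Nat) : Int) by simp,
        PySem.List.pyGetD_natCast,
        show pre ++ x :: y :: suf = (pre ++ [x]) ++ y :: suf by simp,
        getD_append_cons]
    have e2 : PySem.List.pyGetD (pre ++ x :: y :: suf) ((pre.length : Int) + 1 - 1) 0 = x := by
      rw [show ((pre.length : Int) + 1 - 1) = ((pre.length : Nat) : Int) by ring,
        PySem.List.pyGetD_natCast, getD_append_cons]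
    have e3 : PySem.List.pySetD (pre ++ x :: y :: suf) ((pre.length : Int) + 1) (y + x)
        = (pre ++ [x]) ++ (y + x) :: suf := by
      rw [show ((pre.length : Int) + 1) = (((pre ++ [x]).length : Nat) : Int) by simp,
        PySem.List.pySetD_natCast,
        show pre ++ x :: y :: suf = (pre ++ [x]) ++ y :: suf by simp,
        set_append_cons]
    rw [e1, e2, e3]
    have hb : (pre.length : Int) + 1 + ((y :: suf).length : Int)
        = ((pre ++ [x]).length : Int) + 1 + suf.length := by simp; ring
    have ha : (pre.length : Int) + 1 + 1 = ((pre ++ [x]).length : Int) + 1 := by simp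
    rw [ha, hb, ih (pre ++ [x]) (y + x)]
    simp [pvPref, add_comm]

lemma pvPS_eq (N : Int) (c : List Int) (hc : c.length = N.toNat) (hN : 0 ≤ N) :
    pvPS N c = pvPref 0 c := by
  cases c with
  | nil =>
    have : N = 0 := by simp at hc; omega
    subst this
    unfold pvPS
    rw [PySem.List.pyRange_one_eq_nil (by omega)]
    rfl
  | cons x xs =>
    have hN' : N = (xs.length : Int) + 1 := by simp at hc; omega
    unfold pvPS
    have h := pvPS_go xs [] x
    simp only [List.nil_append, List.length_nil, Nat.cast_zero, zero_add] at h
    rw [hN', show (xs.length : Int) + 1 = 1 + (xs.length : Int) by ring, h]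
    simp [pvPref]

-- main per-query preservation
lemma step_pres (N : Int) (q : List Int) (cd cb : List Int)
    (hq : 2 ≤ q.length ∧ 1 ≤ q.getD 0 0 ∧ q.getD 0 0 ≤ N ∧ q.getD 0 0 ≤ q.getD 1 0 + 1)
    (hcd : cd.length = N.toNat) (hcb : cb.length = N.toNat)
    (hinv : ∀ i : Nat, i < N.toNat → (cd.take (i + 1)).sum = cb.getD i 0) :
    (pvAStep N cd q).length = N.toNat ∧ (pvBStep N cb q).length = N.toNat ∧
    ∀ i : Nat, i < N.toNat →
      ((pvAStep N cd q).take (i + 1)).sum = (pvBStep N cb q).getD i 0 := by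
  obtain ⟨hlen2, h0, h0N, h01⟩ := hq
  have hq1 : PySem.List.pyGetD q 1 0 = q.getD 1 0 := by
    rw [PySem.List.pyGetD_eq_getElem q 0 (by omega) (by exact_mod_cast (by omega : (1:Int) < (q.length:Int))),
      List.getD_eq_getElem q 0 (by omega)]
    rfl
  have hq0 : PySem.List.pyGetD q 0 0 = q.getD 0 0 := by
    rw [PySem.List.pyGetD_zero]
  set l0 := q.getD 0 0 with hl0
  set r := q.getD 1 0 with hr0
  have hl1 : 0 ≤ l0 - 1 := by omega
  have hlN : l0 - 1 < N := by omega
  have hjlt : (l0 - 1).toNat < cd.length := by omega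
  have hr1 : 0 ≤ r := by omega
  have hA : pvAStep N cd q =
      if r < N then
        (cd.set (l0 - 1).toNat (cd[(l0 - 1).toNat]'hjlt + 1)).set r.toNat
          ((cd.set (l0 - 1).toNat (cd[(l0 - 1).toNat]'hjlt + 1)).getD r.toNat 0 - 1)
      else cd.set (l0 - 1).toNat (cd[(l0 - 1).toNat]'hjlt + 1) := by
    unfold pvAStep
    simp only [hq0, hq1, add_sub_cancel_right]
    rw [PySem.List.pySetD_of_nonneg cd _ hl1,
      PySem.List.pyGetD_eq_getElem cd 0 hl1 (by omega)]
    split_ifs with h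
    · rw [PySem.List.pySetD_of_nonneg _ _ hr1,
        PySem.List.pyGetD_eq_getElem _ 0 hr1 (by simp [List.length_set]; omega),
        List.getD_eq_getElem _ 0 (by simp [List.length_set]; omega)]
    · rfl
  have hbN : (cb.length : Int) = N := by omega
  obtain ⟨hBlen, hBget⟩ := addRange_spec (min r N - (l0 - 1)).toNat (l0 - 1) (min r N) cb rfl hl1
    (by rw [hbN]; exact min_le_right _ _)
  have hB : pvBStep N cb q =
      (PySem.List.pyRange (l0 - 1) (min r N) 1).foldl
        (fun count j => PySem.List.pySetD count j (PySem.List.pyGetD count j 0 + 1)) cb := by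
    unfold pvBStep
    rw [hq0, hq1]
  refine ⟨?_, ?_, ?_⟩
  · rw [hA]; split_ifs <;> simp [List.length_set] <;> omega
  · rw [hB, hBlen]; omega
  · intro i hi
    have hicb : i < cb.length := by omega
    have hbase := hinv i hi
    rw [List.getD_eq_getElem cb 0 hicb] at hbase
    rw [hB, hBget i hicb]
    by_cases h : r < N
    · have hmin : min r N = r := min_eq_left (le_of_lt h)
      have hrlen : r.toNat < (cd.set (l0 - 1).toNat (cd[(l0 - 1).toNat]'hjlt + 1)).length := by
        simp only [List.length_set]; omega
      rw [hA, if_pos h, sum_take_set _ _ _ _ hrlen, sum_take_set _ _ _ _ hjlt,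
        List.getD_eq_getElem _ 0 hrlen, hbase, hmin]
      simp only [add_sub_cancel_left, sub_sub_cancel_left]
      split_ifs <;> omega
    · have hmin : min r N = N := min_eq_right (by omega)
      rw [hA, if_neg h, sum_take_set _ _ _ _ hjlt, hbase, hmin]
      simp only [add_sub_cancel_left]
      split_ifs <;> omega

lemma queries_fold (N : Int) (qs : List (List Int)) (cd cb : List Int)
    (hqs : ∀ q ∈ qs, 2 ≤ q.length ∧ 1 ≤ q.getD 0 0 ∧ q.getD 0 0 ≤ N ∧ q.getD 0 0 ≤ q.getD 1 0 + 1)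
    (hcd : cd.length = N.toNat) (hcb : cb.length = N.toNat)
    (hinv : ∀ i : Nat, i < N.toNat → (cd.take (i + 1)).sum = cb.getD i 0) :
    (qs.foldl (pvAStep N) cd).length = N.toNat ∧ (qs.foldl (pvBStep N) cb).length = N.toNat ∧
    ∀ i : Nat, i < N.toNat →
      ((qs.foldl (pvAStep N) cd).take (i + 1)).sum = (qs.foldl (pvBStep N) cb).getD i 0 := by
  induction qs generalizing cd cb with
  | nil => exact ⟨hcd, hcb, hinv⟩
  | cons q qs ih =>
    obtain ⟨h1, h2, h3⟩ := step_pres N q cd cb (hqs q (by simp)) hcd hcb hinv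
    simpa using ih (pvAStep N cd q) (pvBStep N cb q) (fun p hp => hqs p (by simp [hp])) h1 h2 h3

-- the final accumulation equals the zip-sum
lemma zip_sum_eq (CS : List Int) (AS : List Int) (h : CS.length ≤ AS.length) :
    ((List.range CS.length).map (fun k => AS.getD k 0 * CS.getD k 0)).sum
      = ((AS.zip CS).map (fun p => p.1 * p.2)).sum := by
  induction CS generalizing AS with
  | nil => simp
  | cons c cs ih =>
    cases AS with
    | nil => simp at h
    | cons a as =>
      simp only [List.length_cons, List.range_succ_eq_map, List.map_cons, List.map_map,
        List.sum_cons, List.zip_cons_cons]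
      have : ((List.range cs.length).map (fun k => as.getD k 0 * cs.getD k 0)).sum
          = ((as.zip cs).map (fun p => p.1 * p.2)).sum := ih as (by simpa using h)
      simp only [List.getD_cons_zero, Function.comp_def, Nat.succ_eq_add_one,
        List.getD_cons_succ]
      rw [← this]

lemma finA_eq (AS CS : List Int) (N : Int) (hN : 0 ≤ N)
    (h1 : CS.length = N.toNat) (h2 : N ≤ (AS.length : Int)) :
    pvFinA AS CS N = ((AS.zip CS).map (fun p => p.1 * p.2)).sum := by
  unfold pvFinA
  rw [PySem.List.foldl_add _ (fun i => PySem.List.pyGetD AS i 0 * PySem.List.pyGetD CS i 0) 0,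
    zero_add, PySem.List.pyRange_neg_one_eq_reverse,
    show (-1 : Int) + 1 = 0 by ring, show N - 1 + 1 = N by ring,
    List.map_reverse, List.sum_reverse]
  obtain ⟨n, rfl⟩ := Int.eq_ofNat_of_zero_le hN
  rw [PySem.List.pyRange_zero_nat, List.map_map]
  have hn : CS.length = n := by simpa using h1
  have hz := zip_sum_eq CS AS (by omega)
  rw [hn] at hz
  rw [← hz]
  apply congrArg
  apply List.map_congr_left
  intro k hk
  simp [PySem.List.pyGetD_natCast]

-- length preservation, used for the degenerate N < 0 case
lemma length_inner_fold (rng : List Int) (xs : List Int) :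
    ((rng.foldl (fun c j => PySem.List.pySetD c j (PySem.List.pyGetD c j 0 + 1)) xs)).length
      = xs.length := by
  induction rng generalizing xs with
  | nil => rfl
  | cons j rng ih => simp [ih, PySem.List.length_pySetD]

lemma length_pvAStep (N : Int) (cd q : List Int) : (pvAStep N cd q).length = cd.length := by
  simp only [pvAStep]
  split_ifs <;> simp [PySem.List.length_pySetD]

lemma length_pvBStep (N : Int) (cb q : List Int) : (pvBStep N cb q).length = cb.length := by
  unfold pvBStep
  exact length_inner_fold _ _

lemma foldl_step_nil (f : List Int → List Int → List Int)
    (hf : ∀ c q, (f c q).length = c.length) (qs : List (List Int)) :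
    qs.foldl f [] = [] := by
  induction qs with
  | nil => rfl
  | cons q qs ih =>
    have : f [] q = [] := List.eq_nil_of_length_eq_zero (by rw [hf]; rfl)
    rw [List.foldl_cons, this, ih]

-- ===== VERDICT (by name: the statement is the Claim_ definition above) =====
theorem maxSumArrangement_spec : Claim_equal_maxSumArrangement := by
  intro A R N M _ hpre
  obtain ⟨hNA, hMR, hrows⟩ := hpre
  unfold Spec_maxSumArrangement
  rw [portA_eq, portB_eq]
  rw [foldl_pyRange_take R [] (pvAStep N) _ M hMR,
    foldl_pyRange_take R [] (pvBStep N) _ M hMR]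
  by_cases hN : 0 ≤ N
  · -- initial arrays
    set cdi : List Int := (PySem.List.pyRange 0 N 1).map (fun _ => 0) with hcdi_def
    have hrep : PySem.List.pyRepeat [(0 : Int)] N = List.replicate N.toNat 0 :=
      PySem.List.pyRepeat_singleton 0 N
    have hcdi : cdi = List.replicate N.toNat 0 := by
      rw [hcdi_def, List.map_const']
      simp [PySem.List.length_pyRange_one]
    have hlen_cdi : cdi.length = N.toNat := by rw [hcdi]; simp
    have hlen_cbi : (PySem.List.pyRepeat [(0 : Int)] N).length = N.toNat := by rw [hrep]; simp
    have hinv0 : ∀ i : Nat, i < N.toNat →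
        ((cdi.take (i + 1)).sum = (PySem.List.pyRepeat [(0 : Int)] N).getD i 0) := by
      intro i hi
      rw [hcdi, hrep]
      simp [List.take_replicate]
    obtain ⟨hFd, hFb, hFinv⟩ := queries_fold N (R.take M.toNat) cdi
      (PySem.List.pyRepeat [(0 : Int)] N) hrows hlen_cdi hlen_cbi hinv0
    set cdF := (R.take M.toNat).foldl (pvAStep N) cdi with hcdF_def
    set cbF := (R.take M.toNat).foldl (pvBStep N) (PySem.List.pyRepeat [(0 : Int)] N) with hcbF_def
    have hPS : pvPS N cdF = cbF := by
      rw [pvPS_eq N cdF hFd hN]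
      apply List.ext_getElem
      · rw [length_pvPref]; omega
      · intro i h1 h2
        rw [getElem_pvPref 0 cdF i (by omega), zero_add, hFinv i (by omega),
          List.getD_eq_getElem cbF 0 h2]
    rw [hPS]
    have hCSlen : (PySem.List.sorted cbF (fun x => x) false).length = N.toNat :=
      (PySem.List.sorted_perm cbF (fun x : Int => x) false).length_eq.trans hFb
    have hASlen : N ≤ ((PySem.List.sorted A (fun x => x) false).length : Int) := by
      rw [(PySem.List.sorted_perm A (fun x : Int => x) false).length_eq]
      exact hNA
    exact finA_eq _ _ N hN hCSlen hASlen
  · -- N < 0 : both count arrays are empty and both results are 0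
    have hnil1 : (PySem.List.pyRange 0 N 1).map (fun _ => (0 : Int)) = [] := by
      rw [PySem.List.pyRange_one_eq_nil (by omega)]; rfl
    have hnil2 : PySem.List.pyRepeat [(0 : Int)] N = [] := by
      rw [PySem.List.pyRepeat_singleton]
      rw [Int.toNat_of_nonpos (by omega)]
      rfl
    rw [hnil1, hnil2,
      foldl_step_nil (pvAStep N) (length_pvAStep N) _,
      foldl_step_nil (pvBStep N) (length_pvBStep N) _]
    have hsnil : PySem.List.sorted ([] : List Int) (fun x => x) false = [] := by
      rw [PySem.List.sorted_eq_nil_iff]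
    have hPSnil : pvPS N ([] : List Int) = [] := by
      unfold pvPS
      rw [PySem.List.pyRange_one_eq_nil (by omega)]
      rfl
    rw [hPSnil, hsnil]
    unfold pvFinA
    rw [PySem.List.pyRange_neg_one_eq_nil (by omega)]
    simp
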